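-- pv_equiv track=rewrite | github.com/bekirdag/ades | src/ades/packs/finance_bundle.py | _merge_symbol_profiles
-- ===== SOURCE A (Python) =====
-- from typing import Any
--
-- def _merge_symbol_profiles(
--     profile_sets: list[dict[str, dict[str, Any]]],
-- ) -> dict[str, dict[str, Any]]:
--     merged: dict[str, dict[str, Any]] = {}
--     for profile_set in profile_sets:
--         for symbol, profile in profile_set.items():
--             target = merged.setdefault(symbol, {"company_name_candidates": []})
--             target["company_name_candidates"] = _dedupe_preserving_order(
--                 [
--                     *target.get("company_name_candidates", []),
--                     *profile.get("company_name_candidates", []),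
--                 ]
--             )
--     return merged
--
-- def _dedupe_preserving_order(values: list[str]) -> list[str]:
--     seen_indices: dict[str, int] = {}
--     deduped: list[str] = []
--     for value in values:
--         key = value.casefold()
--         existing_index = seen_indices.get(key)
--         if existing_index is not None:
--             if _finance_display_text_quality(value) > _finance_display_text_quality(
--                 deduped[existing_index]
--             ):
--                 deduped[existing_index] = value
--             continue
--         seen_indices[key] = len(deduped)
--         deduped.append(value)
--     return deduped
--
-- def _finance_display_text_quality(value: str) -> int:
--     score = 0
--     if any(character.islower() for character in value):
--         score += 3
--     if any(character.isupper() for character in value) and any(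
--         character.islower() for character in value
--     ):
--         score += 1
--     if value.isupper():
--         score -= 1
--     return score
-- ===== SOURCE B (Python) =====
-- from typing import Any
--
--
-- def _merge_symbol_profiles(
--     profile_sets: list[dict[str, dict[str, Any]]],
-- ) -> dict[str, dict[str, Any]]:
--     # Phase 1: flatten every candidate list per symbol, in encounter order.
--     flat: dict[str, list[str]] = {}
--     for profile_set in profile_sets:
--         for symbol, profile in profile_set.items():
--             flat.setdefault(symbol, []).extend(
--                 profile.get("company_name_candidates", [])
--             )
--     # Phase 2: group by casefold key (first-occurrence order), keep the
--     # earliest maximal-quality string of each group (max keeps the first tie).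
--     merged: dict[str, dict[str, Any]] = {}
--     for symbol, values in flat.items():
--         groups: dict[str, list[str]] = {}
--         for key, value in [(v.casefold(), v) for v in values]:
--             groups.setdefault(key, []).append(value)
--         merged[symbol] = {
--             "company_name_candidates": [
--                 max(group, key=_finance_display_text_quality)
--                 for group in groups.values()
--             ]
--         }
--     return merged
--
--
-- def _finance_display_text_quality(value: str) -> int:
--     score = 0
--     if any(character.islower() for character in value):
--         score += 3
--     if any(character.isupper() for character in value) and any(
--         character.islower() for character in value
--     ):
--         score += 1
--     if value.isupper():
--         score -= 1
--     return score
-- ===== Notes on version B (the rewrite author's own statement) =====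
-- stated objective: alternative
-- what changed: A dedupes incrementally, re-running an index-tracking dedupe pass (seen-key -> slot index, in-place slot replacement on strictly better quality) every time a profile adds candidates; B instead flattens all candidates per symbol once, groups them by casefold key into an ordered dict of groups, and in a separate reduce pass emits max(group, key=quality) per group.
import Mathlib
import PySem

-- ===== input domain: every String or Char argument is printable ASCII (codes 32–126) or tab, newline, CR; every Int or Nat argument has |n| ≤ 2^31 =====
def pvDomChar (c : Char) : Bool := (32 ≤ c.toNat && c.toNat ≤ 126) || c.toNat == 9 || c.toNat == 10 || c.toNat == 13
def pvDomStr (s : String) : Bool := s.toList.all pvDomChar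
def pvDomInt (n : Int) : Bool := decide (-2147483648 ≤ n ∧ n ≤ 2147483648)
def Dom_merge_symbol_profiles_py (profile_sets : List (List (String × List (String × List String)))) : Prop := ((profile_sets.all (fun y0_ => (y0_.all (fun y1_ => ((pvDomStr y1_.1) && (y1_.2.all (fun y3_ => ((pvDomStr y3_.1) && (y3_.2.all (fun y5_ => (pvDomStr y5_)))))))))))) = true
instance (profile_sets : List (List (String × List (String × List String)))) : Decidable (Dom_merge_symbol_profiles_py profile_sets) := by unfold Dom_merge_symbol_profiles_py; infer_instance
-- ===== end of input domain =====

-- B replaces A's repeated incremental index-tracking dedupe with a single flatten / group-by-casefold / reduce-by-max pipeline (objective: alternative decomposition, identical results).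

-- ===== PORT A =====
-- _finance_display_text_quality (shared module helper, used verbatim by both Pythons).
-- value.isupper() = "has an uppercase letter and no lowercase letter" — exact on the ASCII domain.
def pvQuality (value : String) : Int :=
  let score : Int := 0
  let score := if value.toList.any PySem.Chars.islower then score + 3 else score
  let score := if value.toList.any PySem.Chars.isupper && value.toList.any PySem.Chars.islower then score + 1 else score
  let score := if value.toList.any PySem.Chars.isupper && !(value.toList.any PySem.Chars.islower) then score - 1 else score
  score

-- one iteration of _dedupe_preserving_order's loop; value.casefold() = lower on the ASCII domain.
-- existing_index is always < deduped.length (it was stored as len(deduped) at append time and the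
-- list only grows or is updated in place), so getD/set are exact for Python's deduped[existing_index].
def pvDedupeStep (st : PySem.Dict String Nat × List String) (value : String) : PySem.Dict String Nat × List String :=
  match st.1.get? (PySem.Str.lower value) with
  | some existing_index =>
      if pvQuality value > pvQuality (st.2.getD existing_index "") then
        (st.1, st.2.set existing_index value)
      else (st.1, st.2)
  | none => (st.1.insert (PySem.Str.lower value) st.2.length, st.2 ++ [value])

def pvDedupe (values : List String) : List String :=
  (values.foldl pvDedupeStep (PySem.Dict.empty, [])).2

-- profile.get("company_name_candidates", [])
def pvCands (profile : List (String × List String)) : List String :=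
  (PySem.Dict.mk profile).getD "company_name_candidates" []

def pvD0 : PySem.Dict String (List String) := PySem.Dict.mk [("company_name_candidates", [])]

-- body of A's inner loop
def pvMergeStep (merged : PySem.Dict String (PySem.Dict String (List String)))
    (sp : String × List (String × List String)) : PySem.Dict String (PySem.Dict String (List String)) :=
  let merged := merged.setdefault sp.1 pvD0
  let target := merged.getD sp.1 pvD0
  merged.insert sp.1 (target.insert "company_name_candidates"
    (pvDedupe (target.getD "company_name_candidates" [] ++ pvCands sp.2)))

def merge_symbol_profiles_py (profile_sets : List (List (String × List (String × List String)))) : List (String × List (String × List String)) :=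
  ((profile_sets.foldl (fun merged profile_set => profile_set.foldl pvMergeStep merged) PySem.Dict.empty).items).map
    (fun p => (p.1, p.2.items))

-- ===== PORT B =====
-- flat.setdefault(symbol, []).extend(profile.get("company_name_candidates", []))
def pvFlatStep (flat : PySem.Dict String (List String))
    (sp : String × List (String × List String)) : PySem.Dict String (List String) :=
  flat.modify sp.1 [] (· ++ pvCands sp.2)

-- groups.setdefault(key, []).append(value) over the (casefold, value) pairs
def pvGroupFold (values : List String) : PySem.Dict String (List String) :=
  (values.map (fun v => (PySem.Str.lower v, v))).foldl
    (fun d p => d.modify p.1 [] (· ++ [p.2])) PySem.Dict.empty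

-- max(group, key=_finance_display_text_quality): first maximal element; every group holds at
-- least one string, so the [] branch is unreachable.
def pvBest (group : List String) : String :=
  match group with
  | [] => ""
  | h :: t => t.foldl (fun best x => if pvQuality x > pvQuality best then x else best) h

def merge_symbol_profiles_py_alt (profile_sets : List (List (String × List (String × List String)))) : List (String × List (String × List String)) :=
  ((profile_sets.foldl (fun flat profile_set => profile_set.foldl pvFlatStep flat) PySem.Dict.empty).items).map
    (fun sv => (sv.1, [("company_name_candidates", (pvGroupFold sv.2).values.map pvBest)]))

-- ===== PRECONDITION & SPEC =====
def Spec_merge_symbol_profiles_py (profile_sets : List (List (String × List (String × List String)))) (out : List (String × List (String × List String))) : Prop := out = merge_symbol_profiles_py_alt profile_sets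
instance (profile_sets : List (List (String × List (String × List String)))) (out : List (String × List (String × List String))) : Decidable (Spec_merge_symbol_profiles_py profile_sets out) := by unfold Spec_merge_symbol_profiles_py; infer_instance

-- ===== CLAIM (what is proved, stated in full; the proofs are below) =====
def Claim_equal_merge_symbol_profiles_py : Prop := ∀ (profile_sets : List (List (String × List (String × List String)))), Dom_merge_symbol_profiles_py profile_sets → Spec_merge_symbol_profiles_py profile_sets (merge_symbol_profiles_py profile_sets)

-- ===== LEMMAS AND PROOFS =====

-- the canonical per-symbol value both sides compute: group the flat candidate list by
-- lower-cased key (first-occurrence order) and keep the first maximal-quality member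
def pvStep (best x : String) : String := if pvQuality x > pvQuality best then x else best
def pvKeys (vs : List String) : List String := PySem.Set.ofList (vs.map PySem.Str.lower)
def pvGroup (vs : List String) (k : String) : List String := vs.filter (fun v => PySem.Str.lower v == k)
def pvTarget (vs : List String) : List String := (pvKeys vs).map (fun k => pvBest (pvGroup vs k))

theorem pvBest_cons (h : String) (t : List String) : pvBest (h :: t) = t.foldl pvStep h := rfl

theorem pvBest_append (gx gy : List String) (h : gx ≠ []) :
    pvBest (gx ++ gy) = gy.foldl pvStep (pvBest gx) := by
  obtain ⟨a, t, rfl⟩ := List.exists_cons_of_ne_nil h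
  rw [List.cons_append, pvBest_cons, pvBest_cons, List.foldl_append]

theorem pvBest_append_singleton (gx : List String) (x : String) (h : gx ≠ []) :
    pvBest (gx ++ [x]) = pvStep (pvBest gx) x := by
  rw [pvBest_append gx [x] h, List.foldl_cons, List.foldl_nil]

theorem pvBest_mem (g : List String) (h : g ≠ []) : pvBest g ∈ g := by
  obtain ⟨a, t, rfl⟩ := List.exists_cons_of_ne_nil h
  rw [pvBest_cons]
  have key : ∀ (l : List String) (b : String), l.foldl pvStep b = b ∨ l.foldl pvStep b ∈ l := by
    intro l
    induction l with
    | nil => simp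
    | cons x xs ih =>
      intro b
      simp only [List.foldl_cons]
      rcases ih (pvStep b x) with h' | h'
      · rw [h']; unfold pvStep; split <;> simp_all
      · simp [h']
  rcases key t a with h' | h' <;> simp [h']

theorem pvKeys_nodup (vs : List String) : (pvKeys vs).Nodup := PySem.Set.nodup_ofList _

theorem pvMem_keys (vs : List String) (k : String) : k ∈ pvKeys vs ↔ k ∈ vs.map PySem.Str.lower :=
  PySem.Set.mem_ofList _ _

theorem pvGroup_ne_nil (vs : List String) (k : String) (h : k ∈ pvKeys vs) : pvGroup vs k ≠ [] := by
  rw [pvMem_keys, List.mem_map] at h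
  obtain ⟨v, hv, rfl⟩ := h
  simp only [pvGroup, ne_eq, List.filter_eq_nil_iff, not_forall]
  exact ⟨v, hv, by simp⟩

theorem pvGroup_eq_nil (vs : List String) (k : String) (h : k ∉ pvKeys vs) : pvGroup vs k = [] := by
  rw [pvMem_keys] at h
  simp only [pvGroup, List.filter_eq_nil_iff]
  intro v hv hk
  exact h (List.mem_map.mpr ⟨v, hv, by simpa using hk⟩)

theorem pvGroup_append (xs ys : List String) (k : String) :
    pvGroup (xs ++ ys) k = pvGroup xs k ++ pvGroup ys k := by simp [pvGroup]

theorem pvKeys_append_singleton (vs : List String) (v : String) :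
    pvKeys (vs ++ [v]) = if PySem.Str.lower v ∈ pvKeys vs then pvKeys vs else pvKeys vs ++ [PySem.Str.lower v] := by
  have hrw : pvKeys (vs ++ [v]) = PySem.Set.add (pvKeys vs) (PySem.Str.lower v) := by
    simp [pvKeys, PySem.Set.ofList, List.foldl_append]
  rw [hrw]
  unfold PySem.Set.add
  by_cases h : PySem.Str.lower v ∈ pvKeys vs
  · rw [if_pos (by simpa using h), if_pos h]
  · rw [if_neg (by simpa using h), if_neg h]

theorem pvGroup_append_singleton (vs : List String) (v k : String) :
    pvGroup (vs ++ [v]) k = pvGroup vs k ++ (if PySem.Str.lower v == k then [v] else []) := by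
  simp only [pvGroup, List.filter_append, List.filter_cons, List.filter_nil]

theorem pvIdx_append (l : List String) (a k : String) :
    List.idxOf? k (l ++ [a]) = ((List.idxOf? k l).or (if k = a then some l.length else none)) := by
  induction l with
  | nil =>
    by_cases h : k = a
    · subst h; simp [List.idxOf?_cons]
    · simp [List.idxOf?_cons, h, Ne.symm h]
  | cons x xs ih =>
    by_cases h : k = x
    · subst h; simp [List.idxOf?_cons]
    · simp only [List.cons_append, List.idxOf?_cons, beq_iff_eq]
      rw [if_neg (by exact fun h' => h h'.symm), if_neg (by exact fun h' => h h'.symm), ih]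
      cases List.idxOf? k xs <;> simp [Option.or]

theorem pvIdx_none (l : List String) (k : String) (h : k ∉ l) : List.idxOf? k l = none := by
  simpa using List.idxOf?_eq_none_iff.mpr h

-- the state invariant of _dedupe_preserving_order's loop
theorem pvDedupe_inv (vs : List String) :
    (vs.foldl pvDedupeStep (PySem.Dict.empty, [])).2 = pvTarget vs ∧
    ∀ k, (vs.foldl pvDedupeStep (PySem.Dict.empty, [])).1.get? k = List.idxOf? k (pvKeys vs) := by
  induction vs using List.reverseRecOn with
  | nil =>
    refine ⟨rfl, fun k => ?_⟩
    simp [pvKeys, PySem.Set.ofList, PySem.Dict.get?_empty]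
  | append_singleton l v ih =>
    rw [List.foldl_append, List.foldl_cons, List.foldl_nil]
    set st := l.foldl pvDedupeStep (PySem.Dict.empty, []) with hst
    obtain ⟨h2, h1⟩ := ih
    have hget := h1 (PySem.Str.lower v)
    by_cases hmem : PySem.Str.lower v ∈ pvKeys l
    · -- existing key: possible in-place upgrade of the stored representative
      have hx : ∃ i, List.idxOf? (PySem.Str.lower v) (pvKeys l) = some i := by
        cases hi : List.idxOf? (PySem.Str.lower v) (pvKeys l) with
        | some i => exact ⟨i, rfl⟩
        | none => exact absurd hmem (by simpa using hi)
      obtain ⟨i, hi⟩ := hx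
      obtain ⟨hlen, hki, -⟩ := List.idxOf?_eq_some_iff.mp hi
      have hkeys : pvKeys (l ++ [v]) = pvKeys l := by rw [pvKeys_append_singleton, if_pos hmem]
      have hgetD : st.2.getD i "" = pvBest (pvGroup l (PySem.Str.lower v)) := by
        rw [h2]
        have hlen' : i < (pvTarget l).length := by simpa [pvTarget] using hlen
        rw [List.getD_eq_getElem _ _ hlen']
        simp only [pvTarget, List.getElem_map, hki]
      have hstep : pvDedupeStep st v =
          if pvQuality v > pvQuality (st.2.getD i "") then (st.1, st.2.set i v) else (st.1, st.2) := by
        unfold pvDedupeStep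
        rw [hget, hi]
      by_cases hq : pvQuality v > pvQuality (pvBest (pvGroup l (PySem.Str.lower v)))
      · -- strictly better quality: replace slot i
        rw [hstep, hgetD, if_pos hq]
        constructor
        · show st.2.set i v = pvTarget (l ++ [v])
          rw [h2]
          unfold pvTarget
          rw [hkeys]
          refine List.ext_getElem (by simp) (fun j hj hj' => ?_)
          have hjk : j < (pvKeys l).length := by simpa using hj'
          rw [List.getElem_set]
          by_cases hji : i = j
          · subst hji
            rw [if_pos rfl]
            have hg : pvGroup (l ++ [v]) ((pvKeys l)[i]) = pvGroup l (PySem.Str.lower v) ++ [v] := by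
              rw [hki, pvGroup_append_singleton]; simp
            rw [List.getElem_map, hg, pvBest_append_singleton _ _ (pvGroup_ne_nil l _ hmem)]
            unfold pvStep
            rw [if_pos hq]
          · rw [if_neg hji]
            have hne : (pvKeys l)[j] ≠ PySem.Str.lower v := by
              intro hEq
              exact hji (((pvKeys_nodup l).getElem_inj_iff (hi := hlen) (hj := hjk)).mp (by rw [hki, hEq]))
            have hg : pvGroup (l ++ [v]) ((pvKeys l)[j]) = pvGroup l ((pvKeys l)[j]) := by
              rw [pvGroup_append_singleton]
              simp [hne.symm]
            simp only [List.getElem_map]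
            rw [hg]
        · intro k
          show st.1.get? k = _
          rw [h1 k, hkeys]
      · -- not better: keep everything
        rw [hstep, hgetD, if_neg hq]
        constructor
        · show st.2 = pvTarget (l ++ [v])
          rw [h2]
          unfold pvTarget
          rw [hkeys]
          refine List.map_congr_left (fun k hk => ?_)
          by_cases hkv : k = PySem.Str.lower v
          · rw [hkv]
            have hg : pvGroup (l ++ [v]) (PySem.Str.lower v) = pvGroup l (PySem.Str.lower v) ++ [v] := by
              rw [pvGroup_append_singleton]; simp
            rw [hg, pvBest_append_singleton _ _ (pvGroup_ne_nil l _ hmem)]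
            unfold pvStep
            rw [if_neg hq]
          · have hg : pvGroup (l ++ [v]) k = pvGroup l k := by
              rw [pvGroup_append_singleton]
              simp [Ne.symm hkv]
            rw [hg]
        · intro k
          show st.1.get? k = _
          rw [h1 k, hkeys]
    · -- new key: append
      have hkeys : pvKeys (l ++ [v]) = pvKeys l ++ [PySem.Str.lower v] := by
        rw [pvKeys_append_singleton, if_neg hmem]
      have hstep : pvDedupeStep st v = (st.1.insert (PySem.Str.lower v) st.2.length, st.2 ++ [v]) := by
        unfold pvDedupeStep
        rw [hget, pvIdx_none _ _ hmem]
      rw [hstep]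
      constructor
      · show st.2 ++ [v] = pvTarget (l ++ [v])
        rw [h2]
        unfold pvTarget
        rw [hkeys, List.map_append]
        congr 1
        · refine List.map_congr_left (fun k hk => ?_)
          have hkv : k ≠ PySem.Str.lower v := fun h => hmem (h ▸ hk)
          have hg : pvGroup (l ++ [v]) k = pvGroup l k := by
            rw [pvGroup_append_singleton]
            simp [Ne.symm hkv]
          rw [hg]
        · have hg : pvGroup (l ++ [v]) (PySem.Str.lower v) = pvGroup l (PySem.Str.lower v) ++ [v] := by
            rw [pvGroup_append_singleton]; simp
          rw [List.map_cons, List.map_nil, hg, pvGroup_eq_nil l _ hmem]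
          rfl
      · intro k
        show (st.1.insert (PySem.Str.lower v) st.2.length).get? k = _
        rw [PySem.Dict.get?_insert, hkeys, pvIdx_append]
        have hlenT : st.2.length = (pvKeys l).length := by
          rw [h2]; simp [pvTarget]
        by_cases hkv : k = PySem.Str.lower v
        · subst hkv
          rw [if_pos rfl, if_pos rfl, pvIdx_none _ _ hmem, hlenT]
          rfl
        · rw [if_neg hkv, if_neg hkv, h1 k]
          cases List.idxOf? k (pvKeys l) <;> rfl

theorem pvDedupe_eq_target (vs : List String) : pvDedupe vs = pvTarget vs :=
  (pvDedupe_inv vs).1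

theorem pvLower_best (vs : List String) (k : String) (h : k ∈ pvKeys vs) :
    PySem.Str.lower (pvBest (pvGroup vs k)) = k := by
  have hm := pvBest_mem _ (pvGroup_ne_nil vs k h)
  simp only [pvGroup, List.mem_filter] at hm
  simpa using hm.2

theorem pvMapLower_target (x : List String) : (pvTarget x).map PySem.Str.lower = pvKeys x := by
  unfold pvTarget
  rw [List.map_map]
  have : ∀ k ∈ pvKeys x, (PySem.Str.lower ∘ fun k => pvBest (pvGroup x k)) k = id k :=
    fun k hk => pvLower_best x k hk
  rw [List.map_congr_left this, List.map_id]

theorem pvOfList_nodup (l : List String) (h : l.Nodup) : PySem.Set.ofList l = l := by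
  have key : ∀ (l s : List String), (s ++ l).Nodup → List.foldl PySem.Set.add s l = s ++ l := by
    intro l
    induction l with
    | nil => simp
    | cons a t ih =>
      intro s hn
      have ha : a ∉ s := by
        intro hmem
        exact (List.disjoint_of_nodup_append hn) hmem List.mem_cons_self
      rw [List.foldl_cons]
      have hadd : PySem.Set.add s a = s ++ [a] := by
        unfold PySem.Set.add
        rw [if_neg (by simpa using ha)]
      rw [hadd, ih (s ++ [a]) (by simpa using hn)]
      simp
  simpa using key l [] (by simpa using h)

theorem pvFilter_nodup (l : List String) (h : l.Nodup) (k : String) :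
    l.filter (fun x => x == k) = if k ∈ l then [k] else [] := by
  induction l with
  | nil => simp
  | cons a t ih =>
    rcases List.nodup_cons.mp h with ⟨ha, ht⟩
    by_cases hk : a = k
    · subst hk
      simp [ih ht, ha]
    · by_cases hm : k ∈ t
      · simp [ih ht, hk, hm, Ne.symm hk]
      · simp [ih ht, hk, hm, Ne.symm hk]

theorem pvGroup_target (x : List String) (k : String) :
    pvGroup (pvTarget x) k = if k ∈ pvKeys x then [pvBest (pvGroup x k)] else [] := by
  unfold pvGroup pvTarget
  rw [List.filter_map]
  have : ∀ k' ∈ pvKeys x,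
      ((fun v => PySem.Str.lower v == k) ∘ fun k' => pvBest (pvGroup x k')) k' = (fun x => x == k) k' := by
    intro k' hk'
    simp [pvLower_best x k' hk']
  rw [List.filter_congr this, pvFilter_nodup _ (pvKeys_nodup x) k]
  split <;> rename_i hm
  · rfl
  · rfl

theorem pvKeys_restart (x y : List String) : pvKeys (pvTarget x ++ y) = pvKeys (x ++ y) := by
  unfold pvKeys
  rw [List.map_append, List.map_append, pvMapLower_target]
  show PySem.Set.ofList (pvKeys x ++ y.map PySem.Str.lower) = _
  unfold PySem.Set.ofList
  rw [List.foldl_append, List.foldl_append]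
  congr 1
  exact pvOfList_nodup _ (pvKeys_nodup x)

theorem pvTarget_restart (x y : List String) : pvTarget (pvTarget x ++ y) = pvTarget (x ++ y) := by
  show (pvKeys (pvTarget x ++ y)).map (fun k => pvBest (pvGroup (pvTarget x ++ y) k))
    = (pvKeys (x ++ y)).map (fun k => pvBest (pvGroup (x ++ y) k))
  rw [pvKeys_restart]
  refine List.map_congr_left (fun k hk => ?_)
  rw [pvGroup_append, pvGroup_append, pvGroup_target]
  by_cases hx : k ∈ pvKeys x
  · rw [if_pos hx, pvBest_append _ _ (pvGroup_ne_nil x k hx),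
      pvBest_append _ _ (List.cons_ne_nil _ _)]
    rfl
  · rw [if_neg hx, pvGroup_eq_nil x k hx]

theorem pvDedupe_restart (x y : List String) : pvDedupe (pvDedupe x ++ y) = pvDedupe (x ++ y) := by
  rw [pvDedupe_eq_target, pvDedupe_eq_target x, pvDedupe_eq_target, pvTarget_restart]

-- B's per-symbol pipeline computes pvTarget
theorem pvGroupFold_eq_target (vs : List String) :
    (pvGroupFold vs).values.map pvBest = pvTarget vs := by
  have hkeys : (pvGroupFold vs).keys = pvKeys vs := by
    have := PySem.Dict.keys_foldl_modify_key (vs.map (fun v => (PySem.Str.lower v, v)))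
      Prod.fst [] (fun _ p v => v ++ [p.2]) PySem.Dict.empty
    simpa [pvGroupFold, pvKeys, PySem.Set.update, PySem.Set.ofList, List.map_map] using this
  have hnd : (pvGroupFold vs).keys.Nodup := hkeys ▸ pvKeys_nodup vs
  have hgetD : ∀ k, (pvGroupFold vs).getD k [] = pvGroup vs k := by
    intro k
    have := PySem.Dict.getD_foldl_modify_append (vs.map (fun v => (PySem.Str.lower v, v)))
      PySem.Dict.empty k
    simp only [pvGroupFold]
    rw [this]
    rw [List.filter_map, List.map_map]
    simp [pvGroup, PySem.Dict.getD_empty, Function.comp_def]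
  rw [PySem.Dict.values_eq_map_keys _ hnd [], hkeys, List.map_map]
  unfold pvTarget
  refine List.map_congr_left (fun k hk => ?_)
  simp only [Function.comp_apply]
  rw [hgetD]

-- literal inner-dict computations
theorem pvGetD_mk (l : List String) :
    (PySem.Dict.mk [("company_name_candidates", l)]).getD "company_name_candidates" [] = l := rfl

theorem pvInsert_mk (l X : List String) :
    (PySem.Dict.mk [("company_name_candidates", l)]).insert "company_name_candidates" X
      = PySem.Dict.mk [("company_name_candidates", X)] := rfl

-- the relation between A's merged dict and B's flat dict held through both loops
def pvRel (m : PySem.Dict String (PySem.Dict String (List String))) (f : PySem.Dict String (List String)) : Prop :=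
  m.items = f.items.map (fun sv => (sv.1, PySem.Dict.mk [("company_name_candidates", pvDedupe sv.2)])) ∧
  f.keys.Nodup

theorem pvRel_step (m : PySem.Dict String (PySem.Dict String (List String))) (f : PySem.Dict String (List String))
    (h : pvRel m f) (sp : String × List (String × List String)) :
    pvRel (pvMergeStep m sp) (pvFlatStep f sp) := by
  obtain ⟨hi, hnd⟩ := h
  have hk : m.keys = f.keys := by
    simp only [PySem.Dict.keys, hi, List.map_map]
    rfl
  have hmnd : m.keys.Nodup := hk ▸ hnd
  by_cases hc : f.contains sp.1 = true
  · -- symbol already present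
    have hmc : m.contains sp.1 = true :=
      (PySem.Dict.contains_iff_mem_keys _ _).mpr (hk ▸ (PySem.Dict.contains_iff_mem_keys _ _).mp hc)
    obtain ⟨vs, hvs⟩ : ∃ vs, f.get? sp.1 = some vs := by
      cases hx : f.get? sp.1 with
      | some v => exact ⟨v, rfl⟩
      | none => rw [PySem.Dict.contains_eq_isSome_get?, hx] at hc; simp at hc
    have hvm : (sp.1, vs) ∈ f.items := PySem.Dict.mem_items_of_get?_eq_some _ hvs
    have hgf : f.getD sp.1 [] = vs := PySem.Dict.getD_of_get?_eq_some _ _ hvs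
    have hvm' : (sp.1, PySem.Dict.mk [("company_name_candidates", pvDedupe vs)]) ∈ m.items := by
      rw [hi]; exact List.mem_map.mpr ⟨(sp.1, vs), hvm, rfl⟩
    have htgt : m.getD sp.1 pvD0 = PySem.Dict.mk [("company_name_candidates", pvDedupe vs)] :=
      PySem.Dict.getD_of_mem_items _ hvm' hmnd _
    constructor
    · show ((m.setdefault sp.1 pvD0).insert sp.1 _).items = _
      rw [PySem.Dict.setdefault_of_contains _ _ hmc, htgt, pvGetD_mk, pvInsert_mk]
      rw [PySem.Dict.items_insert_of_contains _ _ hmc]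
      show _ = ((f.modify sp.1 [] (· ++ pvCands sp.2)).items).map _
      simp only [PySem.Dict.modify]
      rw [hgf, PySem.Dict.items_insert_of_contains _ _ hc, hi, List.map_map, List.map_map]
      refine List.map_congr_left (fun p hp => ?_)
      by_cases hps : p.1 = sp.1
      · simp only [Function.comp_apply, hps, beq_self_eq_true, if_true]
        rw [pvDedupe_restart]
      · simp only [Function.comp_apply, beq_iff_eq, hps, if_false]
    · show (f.modify sp.1 [] _).keys.Nodup
      simp only [PySem.Dict.modify]
      rw [PySem.Dict.keys_insert_of_contains _ _ hc]
      exact hnd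
  · have hcf : f.contains sp.1 = false := by simpa using hc
    have hmcf : m.contains sp.1 = false := by
      by_contra hcon
      have : m.contains sp.1 = true := by simpa using hcon
      exact hc ((PySem.Dict.contains_iff_mem_keys _ _).mpr (hk ▸ (PySem.Dict.contains_iff_mem_keys _ _).mp this))
    have hsk : sp.1 ∉ f.keys := by
      intro hm
      have hct := (PySem.Dict.contains_iff_mem_keys _ _).mpr hm
      rw [hcf] at hct
      exact Bool.false_ne_true hct
    constructor
    · show ((m.setdefault sp.1 pvD0).insert sp.1
        ((m.setdefault sp.1 pvD0).getD sp.1 pvD0 |>.insert "company_name_candidates"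
          (pvDedupe (((m.setdefault sp.1 pvD0).getD sp.1 pvD0).getD "company_name_candidates" [] ++ pvCands sp.2)))).items = _
      rw [PySem.Dict.getD_setdefault_self, PySem.Dict.getD_of_not_contains _ _ hmcf]
      show ((m.setdefault sp.1 pvD0).insert sp.1
        ((PySem.Dict.mk [("company_name_candidates", [])]).insert "company_name_candidates"
          (pvDedupe ((PySem.Dict.mk [("company_name_candidates", [])]).getD "company_name_candidates" [] ++ pvCands sp.2)))).items = _
      rw [pvGetD_mk, pvInsert_mk]
      rw [PySem.Dict.setdefault_of_not_contains _ _ hmcf]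
      rw [PySem.Dict.insert_insert_self]
      rw [PySem.Dict.items_insert_of_not_contains _ _ hmcf]
      show _ = ((f.modify sp.1 [] (· ++ pvCands sp.2)).items).map _
      simp only [PySem.Dict.modify]
      rw [PySem.Dict.getD_of_not_contains _ _ hcf, PySem.Dict.items_insert_of_not_contains _ _ hcf]
      rw [List.map_append, hi]
      rfl
    · show (f.modify sp.1 [] _).keys.Nodup
      simp only [PySem.Dict.modify]
      rw [PySem.Dict.keys_insert_of_not_contains _ _ hcf]
      simp [List.nodup_append, hnd]
      exact fun a ha h => hsk (h ▸ ha)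

theorem pvRel_foldl (l : List (String × List (String × List String)))
    (m : PySem.Dict String (PySem.Dict String (List String))) (f : PySem.Dict String (List String))
    (h : pvRel m f) : pvRel (l.foldl pvMergeStep m) (l.foldl pvFlatStep f) := by
  induction l generalizing m f with
  | nil => exact h
  | cons sp t ih => exact ih _ _ (pvRel_step m f h sp)

theorem pvRel_foldl2 (pss : List (List (String × List (String × List String))))
    (m : PySem.Dict String (PySem.Dict String (List String))) (f : PySem.Dict String (List String))
    (h : pvRel m f) :
    pvRel (pss.foldl (fun m s => s.foldl pvMergeStep m) m) (pss.foldl (fun f s => s.foldl pvFlatStep f) f) := by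
  induction pss generalizing m f with
  | nil => exact h
  | cons ps t ih => exact ih _ _ (pvRel_foldl ps m f h)

-- ===== VERDICT (by name: the statement is the Claim_ definition above) =====
theorem merge_symbol_profiles_py_spec : Claim_equal_merge_symbol_profiles_py := by
  intro pss _
  unfold Spec_merge_symbol_profiles_py merge_symbol_profiles_py merge_symbol_profiles_py_alt
  have h := pvRel_foldl2 pss PySem.Dict.empty PySem.Dict.empty ⟨rfl, List.nodup_nil⟩
  rw [h.1, List.map_map]
  refine List.map_congr_left (fun sv _ => ?_)
  show (sv.1, (PySem.Dict.mk [("company_name_candidates", pvDedupe sv.2)]).items) = _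
  rw [pvGroupFold_eq_target, pvDedupe_eq_target]
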